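-- pv_equiv track=rewrite | github.com/gislobo/atlutdhistory | fixture.py | splitFullName
-- ===== SOURCE A (Python) =====
-- def splitFullName(fullname: str) -> tuple[str | None, str | None]:
--     if not fullname or not fullname.strip():
--         return None, None
--
--     # Normalize whitespace
--     tokens = fullname.strip().split()
--
--     # Single token
--     if len(tokens) == 1:
--         return tokens[0], None
--
--     # Common suffixes (case-insensitive, with punctuation ignored)
--     suffixes = {"jr", "sr", "ii", "iii", "iv", "v", "phd", "md", "esq"}
--     def norm(t: str) -> str:
--         return "".join(ch for ch in t.lower() if ch.isalnum())
--
--     # Strip trailing suffixes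
--     while len(tokens) > 1 and norm(tokens[-1]) in suffixes:
--         tokens.pop()
--
--     # If everything got stripped to one token
--     if len(tokens) == 1:
--         return tokens[0], None
--
--     # Surname particles that often belong with the last name
--     particles = {"da", "de", "del", "della", "der", "di", "dos", "du", "la", "le",
--                  "van", "von", "bin", "al", "ibn", "mac", "mc", "st", "st.", "ter"}
--
--     # Start with last token as core last name
--     lastParts = [tokens[-1]]
--
--     # Pull preceding particles into the last name
--     i = len(tokens) - 2
--     while i >= 1 and norm(tokens[i]) in particles:
--         lastParts.insert(0, tokens[i])
--         i -= 1
--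
--     firstname = tokens[0]
--     lastname = " ".join(lastParts) if lastParts else None
--
--     # If anything remains between first and lastParts, treat as middle names; attach to last name
--     if i >= 1:
--         middle = " ".join(tokens[1:i+1])
--         lastname = f"{middle} {lastname}" if lastname else middle
--
--     return firstname, lastname
-- ===== SOURCE B (Python) =====
-- def splitFullName(fullname: str) -> tuple[str | None, str | None]:
--     # After trailing suffixes are stripped, A's particle scan + middle reattachment
--     # always reconstructs " ".join(tokens[1:]), so B returns that directly.
--     tokens = fullname.split()
--     if not tokens:
--         return None, None
--     if len(tokens) == 1:
--         return tokens[0], None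
--
--     suffixes = {"jr", "sr", "ii", "iii", "iv", "v", "phd", "md", "esq"}
--
--     def norm(t: str) -> str:
--         return "".join(ch for ch in t.lower() if ch.isalnum())
--
--     while len(tokens) > 1 and norm(tokens[-1]) in suffixes:
--         tokens.pop()
--
--     if len(tokens) == 1:
--         return tokens[0], None
--     return tokens[0], " ".join(tokens[1:])
-- ===== Notes on version B (the rewrite author's own statement) =====
-- stated objective: simpler
-- what changed: B drops A's particle set, backward index scan and middle-name reattachment entirely: after stripping trailing suffixes the last name is always exactly the space-join of all tokens after the first, which B returns directly (equivalence proved in Lean).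
import Mathlib
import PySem

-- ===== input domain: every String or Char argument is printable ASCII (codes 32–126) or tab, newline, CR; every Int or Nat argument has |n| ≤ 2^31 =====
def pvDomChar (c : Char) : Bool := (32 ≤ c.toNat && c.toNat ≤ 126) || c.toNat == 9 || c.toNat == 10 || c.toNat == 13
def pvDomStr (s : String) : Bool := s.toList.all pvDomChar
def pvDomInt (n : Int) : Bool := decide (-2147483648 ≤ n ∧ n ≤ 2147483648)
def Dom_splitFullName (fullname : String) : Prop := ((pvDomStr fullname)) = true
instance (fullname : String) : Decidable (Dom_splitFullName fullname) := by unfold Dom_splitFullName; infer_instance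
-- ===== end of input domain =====

-- B drops A's provably-dead particle set, backward index scan and middle-name reattachment:
-- after stripping trailing suffixes the last name is always exactly " ".join(tokens[1:]) (objective: simpler).

-- ===== PORT A =====

-- norm(t) = "".join(ch for ch in t.lower() if ch.isalnum()), kept as code points
def pvNormA (t : String) : List Char :=
  (PySem.Chars.lower t.toList).filter PySem.Chars.isalnum

def pvSuffixesA : List (List Char) :=
  ["jr".toList, "sr".toList, "ii".toList, "iii".toList, "iv".toList, "v".toList,
   "phd".toList, "md".toList, "esq".toList]

def pvParticlesA : List (List Char) :=
  ["da".toList, "de".toList, "del".toList, "della".toList, "der".toList, "di".toList,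
   "dos".toList, "du".toList, "la".toList, "le".toList, "van".toList, "von".toList,
   "bin".toList, "al".toList, "ibn".toList, "mac".toList, "mc".toList, "st".toList,
   "st.".toList, "ter".toList]

-- while len(tokens) > 1 and norm(tokens[-1]) in suffixes: tokens.pop()
-- (tokens.pop() removes the last element, return value unused: dropLast is exact here)
def pvStripSufA (ts : List String) : List String :=
  if h : 1 < ts.length ∧ pvNormA (PySem.List.pyGetD ts (-1) "") ∈ pvSuffixesA then
    pvStripSufA ts.dropLast
  else ts
termination_by ts.length
decreasing_by simp [List.length_dropLast]; omega

-- i = len(tokens) - 2; while i >= 1 and norm(tokens[i]) in particles: lastParts.insert(0, tokens[i]); i -= 1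
-- (i stays ≥ 0 in Python here, so a Nat counter is exact)
def pvParticleLoopA (ts : List String) (i : Nat) (lastParts : List String) : Nat × List String :=
  if h : 1 ≤ i ∧ pvNormA (PySem.List.pyGetD ts (i : Int) "") ∈ pvParticlesA then
    pvParticleLoopA ts (i - 1) (PySem.List.insert lastParts 0 (PySem.List.pyGetD ts (i : Int) ""))
  else (i, lastParts)
termination_by i
decreasing_by omega

def splitFullName (fullname : String) : Option String × Option String :=
  -- if not fullname or not fullname.strip(): return None, None
  if fullname.toList = [] ∨ (PySem.Str.strip fullname).toList = [] then (none, none)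
  else
    let tokens := PySem.Str.split₀ (PySem.Str.strip fullname)
    if tokens.length = 1 then (some (PySem.List.pyGetD tokens 0 ""), none)
    else
      let tokens2 := pvStripSufA tokens
      if tokens2.length = 1 then (some (PySem.List.pyGetD tokens2 0 ""), none)
      else
        let r := pvParticleLoopA tokens2 (tokens2.length - 2) [PySem.List.pyGetD tokens2 (-1) ""]
        let i := r.1
        let lastParts := r.2
        let firstname := PySem.List.pyGetD tokens2 0 ""
        let lastname : Option String :=
          if lastParts ≠ [] then some (PySem.Str.join " " lastParts) else none
        let lastname :=
          if 1 ≤ i then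
            let middle := PySem.Str.join " " (PySem.List.slice tokens2 (some 1) (some ((i : Int) + 1)))
            match lastname with
            | some l =>
                -- f"{middle} {lastname}" if lastname else middle  (a str is falsy iff empty)
                if l.toList = [] then some middle
                else some (String.ofList (middle.toList ++ ' ' :: l.toList))
            | none => some middle
          else lastname
        (some firstname, lastname)

-- ===== PORT B =====

def pvNormB (t : String) : List Char :=
  (PySem.Chars.lower t.toList).filter PySem.Chars.isalnum

def pvSuffixesB : List (List Char) :=
  ["jr".toList, "sr".toList, "ii".toList, "iii".toList, "iv".toList, "v".toList,
   "phd".toList, "md".toList, "esq".toList]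

def pvStripSufB (ts : List String) : List String :=
  if h : 1 < ts.length ∧ pvNormB (PySem.List.pyGetD ts (-1) "") ∈ pvSuffixesB then
    pvStripSufB ts.dropLast
  else ts
termination_by ts.length
decreasing_by simp [List.length_dropLast]; omega

def splitFullName_alt (fullname : String) : Option String × Option String :=
  let tokens := PySem.Str.split₀ fullname
  if tokens = [] then (none, none)
  else if tokens.length = 1 then (some (PySem.List.pyGetD tokens 0 ""), none)
  else
    let tokens2 := pvStripSufB tokens
    if tokens2.length = 1 then (some (PySem.List.pyGetD tokens2 0 ""), none)
    else (some (PySem.List.pyGetD tokens2 0 ""),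
          some (PySem.Str.join " " (PySem.List.slice tokens2 (some 1) none)))

-- ===== PRECONDITION & SPEC =====
def Spec_splitFullName (fullname : String) (out : Option String × Option String) : Prop := out = splitFullName_alt fullname
instance (fullname : String) (out : Option String × Option String) : Decidable (Spec_splitFullName fullname out) := by unfold Spec_splitFullName; infer_instance

-- ===== CLAIM (what is proved, stated in full; the proofs are below) =====
def Claim_equal_splitFullName : Prop := ∀ (fullname : String), Dom_splitFullName fullname → Spec_splitFullName fullname (splitFullName fullname)

-- ===== LEMMAS AND PROOFS =====


theorem pv_go_all_space (t : List Char) (cur : List Char) (acc : List (List Char))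
    (h : ∀ c ∈ t, PySem.Chars.isspace c = true) :
    PySem.Chars.split₀.go t cur acc
      = (if cur.isEmpty then acc.reverse else (cur.reverse :: acc).reverse) := by
  induction t generalizing cur acc with
  | nil => simp [PySem.Chars.split₀.go]
  | cons c t ih =>
    have hc : PySem.Chars.isspace c = true := h c (by simp)
    have ht : ∀ c ∈ t, PySem.Chars.isspace c = true := fun c hc => h c (by simp [hc])
    rw [PySem.Chars.split₀.go, if_pos hc]
    by_cases hcur : cur.isEmpty
    · rw [if_pos hcur, ih _ _ ht]; simp [hcur]
    · rw [if_neg hcur, ih _ _ ht]; simp [hcur]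

theorem pv_go_append_space (u t : List Char) (cur : List Char) (acc : List (List Char))
    (h : ∀ c ∈ t, PySem.Chars.isspace c = true) :
    PySem.Chars.split₀.go (u ++ t) cur acc = PySem.Chars.split₀.go u cur acc := by
  induction u generalizing cur acc with
  | nil => rw [List.nil_append, pv_go_all_space t cur acc h, PySem.Chars.split₀.go]
  | cons c u ih =>
    rw [List.cons_append, PySem.Chars.split₀.go, PySem.Chars.split₀.go]
    by_cases hc : PySem.Chars.isspace c
    · rw [if_pos hc, if_pos hc]
      by_cases hcur : cur.isEmpty
      · rw [if_pos hcur, if_pos hcur, ih]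
      · rw [if_neg hcur, if_neg hcur, ih]
    · rw [if_neg hc, if_neg hc, ih]

theorem pv_split₀_lstrip (s : List Char) :
    PySem.Chars.split₀ (PySem.Chars.lstrip s) = PySem.Chars.split₀ s := by
  unfold PySem.Chars.split₀ PySem.Chars.lstrip
  induction s with
  | nil => rfl
  | cons c s ih =>
    by_cases hc : PySem.Chars.isspace c
    · rw [List.dropWhile_cons_of_pos hc, ih, PySem.Chars.split₀.go, if_pos hc]
      simp
    · rw [List.dropWhile_cons_of_neg hc]

theorem pv_split₀_strip (s : List Char) :
    PySem.Chars.split₀ (PySem.Chars.strip s) = PySem.Chars.split₀ s := by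
  have hdec : PySem.Chars.lstrip s
      = PySem.Chars.strip s ++ (List.takeWhile PySem.Chars.isspace (PySem.Chars.lstrip s).reverse).reverse := by
    unfold PySem.Chars.strip PySem.Chars.rstrip
    conv_lhs => rw [← List.reverse_reverse (PySem.Chars.lstrip s),
      ← List.takeWhile_append_dropWhile (p := PySem.Chars.isspace) (l := (PySem.Chars.lstrip s).reverse)]
    rw [List.reverse_append]
  have : PySem.Chars.split₀ (PySem.Chars.lstrip s) = PySem.Chars.split₀ (PySem.Chars.strip s) := by
    rw [hdec]
    unfold PySem.Chars.split₀
    exact pv_go_append_space _ _ _ _ (by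
      intro c hc
      exact List.mem_takeWhile_imp (List.mem_reverse.mp hc))
  rw [← this, pv_split₀_lstrip]


theorem pv_go_ne_nil (s : List Char) (cur : List Char) (acc : List (List Char))
    (h : cur ≠ [] ∨ acc ≠ []) : PySem.Chars.split₀.go s cur acc ≠ [] := by
  induction s generalizing cur acc with
  | nil =>
    rw [PySem.Chars.split₀.go]
    by_cases hcur : cur.isEmpty
    · rw [if_pos hcur]
      rcases h with h | h
      · exact absurd (List.isEmpty_iff.mp hcur) h
      · simpa using h
    · rw [if_neg hcur]; simp
  | cons c s ih =>
    rw [PySem.Chars.split₀.go]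
    by_cases hc : PySem.Chars.isspace c
    · rw [if_pos hc]
      by_cases hcur : cur.isEmpty
      · rw [if_pos hcur]
        rcases h with h | h
        · exact absurd (List.isEmpty_iff.mp hcur) h
        · exact ih [] acc (Or.inr h)
      · rw [if_neg hcur]
        exact ih [] _ (Or.inr (by simp))
    · rw [if_neg hc]
      exact ih (c :: cur) acc (Or.inl (by simp))

theorem pv_go_mem_ne_nil (s : List Char) (cur : List Char) (acc : List (List Char))
    (hacc : ∀ a ∈ acc, a ≠ []) : ∀ x ∈ PySem.Chars.split₀.go s cur acc, x ≠ [] := by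
  induction s generalizing cur acc with
  | nil =>
    rw [PySem.Chars.split₀.go]
    by_cases hcur : cur.isEmpty
    · rw [if_pos hcur]; simpa using hacc
    · rw [if_neg hcur]
      intro x hx
      simp only [List.mem_reverse, List.mem_cons] at hx
      rcases hx with rfl | hx
      · simp only [ne_eq, List.reverse_eq_nil_iff]
        exact fun h => hcur (by simp [h])
      · exact hacc x hx
  | cons c s ih =>
    rw [PySem.Chars.split₀.go]
    by_cases hc : PySem.Chars.isspace c
    · rw [if_pos hc]
      by_cases hcur : cur.isEmpty
      · rw [if_pos hcur]; exact ih [] acc hacc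
      · rw [if_neg hcur]
        refine ih [] _ ?_
        intro a ha
        rcases List.mem_cons.mp ha with rfl | ha
        · simp only [ne_eq, List.reverse_eq_nil_iff]
          exact fun h => hcur (by simp [h])
        · exact hacc a ha
    · rw [if_neg hc]
      exact ih (c :: cur) acc hacc

theorem pv_split₀_mem_ne_nil (s : List Char) : ∀ x ∈ PySem.Chars.split₀ s, x ≠ [] :=
  pv_go_mem_ne_nil s [] [] (by simp)

theorem pv_split₀_nil_iff (s : List Char) :
    PySem.Chars.split₀ s = [] ↔ PySem.Chars.strip s = [] := by
  constructor
  · intro h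
    by_contra hne
    cases hstrip : PySem.Chars.strip s with
    | nil => exact hne hstrip
    | cons c rest =>
      have hl : PySem.Chars.lstrip s
          = PySem.Chars.strip s ++ (List.takeWhile PySem.Chars.isspace (PySem.Chars.lstrip s).reverse).reverse := by
        unfold PySem.Chars.strip PySem.Chars.rstrip
        conv_lhs => rw [← List.reverse_reverse (PySem.Chars.lstrip s),
          ← List.takeWhile_append_dropWhile (p := PySem.Chars.isspace) (l := (PySem.Chars.lstrip s).reverse)]
        rw [List.reverse_append]
      have hcne : PySem.Chars.isspace c = false := by
        obtain ⟨tail, hld⟩ : ∃ tail, PySem.Chars.lstrip s = c :: (rest ++ tail) :=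
          ⟨_, by rw [hl, hstrip, List.cons_append]⟩
        unfold PySem.Chars.lstrip at hld
        have hne' : List.dropWhile PySem.Chars.isspace s ≠ [] := by rw [hld]; simp
        have hh := List.head_dropWhile_not PySem.Chars.isspace (l := s) hne'
        have hc : (List.dropWhile PySem.Chars.isspace s).head hne' = c := by
          simp only [hld, List.head_cons]
        rw [hc] at hh
        simpa using hh
      rw [← pv_split₀_strip s, hstrip] at h
      unfold PySem.Chars.split₀ at h
      rw [PySem.Chars.split₀.go, if_neg (by simp [hcne])] at h
      exact pv_go_ne_nil _ _ _ (Or.inl (by simp)) h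
  · intro h
    rw [← pv_split₀_strip s, h]
    rfl

theorem pv_stripSufB_eq (ts : List String) : pvStripSufB ts = pvStripSufA ts := by
  fun_induction pvStripSufB ts with
  | case1 ts h ih =>
    have h' : 1 < ts.length ∧ pvNormA (PySem.List.pyGetD ts (-1) "") ∈ pvSuffixesA := h
    rw [pvStripSufA, dif_pos h', ih]
  | case2 ts h =>
    have h' : ¬(1 < ts.length ∧ pvNormA (PySem.List.pyGetD ts (-1) "") ∈ pvSuffixesA) := h
    rw [pvStripSufA, dif_neg h']

theorem pv_stripSufA_prefix (ts : List String) : pvStripSufA ts <+: ts := by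
  fun_induction pvStripSufA ts with
  | case1 ts h ih => exact ih.trans (List.dropLast_prefix ts)
  | case2 ts h => exact List.prefix_refl ts

theorem pv_stripSufA_length (ts : List String) (h : ts ≠ []) : 1 ≤ (pvStripSufA ts).length := by
  fun_induction pvStripSufA ts with
  | case1 ts h1 ih =>
    exact ih (by rw [← List.length_pos_iff, List.length_dropLast]; omega)
  | case2 ts h1 => rw [← List.length_pos_iff] at h; omega

theorem pv_pyGetD_neg_one (ts : List String) (h : ts ≠ []) :
    [PySem.List.pyGetD ts (-1) ""] = ts.drop (ts.length - 1) := by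
  rw [List.drop_length_sub_one h]
  have hlen : 1 ≤ ts.length := List.length_pos_iff.mpr h
  simp only [PySem.List.pyGetD, PySem.List.pyGet?, PySem.List.pyIdx?]
  rw [if_neg (by omega), if_pos (by simp; omega)]
  simp only [Option.bind_some]
  rw [List.getLast_eq_getElem, List.getElem?_eq_getElem (by omega)]
  rfl

theorem pv_particleLoop_inv (ts : List String) (i : Nat) (hi : i + 1 < ts.length) :
    ∃ j, j ≤ i ∧ pvParticleLoopA ts i (ts.drop (i + 1)) = (j, ts.drop (j + 1)) := by
  induction i using Nat.strong_induction_on with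
  | _ i ih =>
    rw [pvParticleLoopA]
    by_cases h : 1 ≤ i ∧ pvNormA (PySem.List.pyGetD ts (i : Int) "") ∈ pvParticlesA
    · rw [dif_pos h]
      have hi1 : i < ts.length := by omega
      have hcons : PySem.List.insert (ts.drop (i + 1)) 0 (PySem.List.pyGetD ts (i : Int) "")
          = ts.drop ((i - 1) + 1) := by
        rw [PySem.List.insert_zero, PySem.List.pyGetD_natCast, Nat.sub_add_cancel h.1,
          List.getD_eq_getElem ts "" hi1]
        exact (List.drop_eq_getElem_cons hi1).symm
      rw [hcons]
      obtain ⟨j, hj, hres⟩ := ih (i - 1) (by omega) (by omega)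
      exact ⟨j, by omega, hres⟩
    · rw [dif_neg h]
      exact ⟨i, le_refl i, rfl⟩

theorem pv_join_append (sep : List Char) (A B : List (List Char)) (hA : A ≠ []) (hB : B ≠ []) :
    PySem.Chars.join sep (A ++ B) = PySem.Chars.join sep A ++ sep ++ PySem.Chars.join sep B := by
  induction A with
  | nil => exact absurd rfl hA
  | cons a A ih =>
    cases A with
    | nil =>
      cases B with
      | nil => exact absurd rfl hB
      | cons b B => rw [List.singleton_append, PySem.Chars.join_cons_cons, PySem.Chars.join_singleton]
    | cons a' A' =>
      rw [show (a :: a' :: A') ++ B = a :: a' :: (A' ++ B) from rfl, PySem.Chars.join_cons_cons,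
        show a' :: (A' ++ B) = (a' :: A') ++ B from rfl, ih (by simp), PySem.Chars.join_cons_cons]
      simp [List.append_assoc]

-- ===== VERDICT (by name: the statement is the Claim_ definition above) =====

set_option maxHeartbeats 1000000 in
theorem splitFullName_spec : Claim_equal_splitFullName := by
  intro fullname _hdom
  unfold Spec_splitFullName splitFullName splitFullName_alt
  have htok : PySem.Str.split₀ (PySem.Str.strip fullname) = PySem.Str.split₀ fullname := by
    unfold PySem.Str.split₀
    rw [PySem.Str.toList_strip, pv_split₀_strip]
  by_cases hs : PySem.Chars.strip fullname.toList = []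
  · rw [if_pos (Or.inr (by rw [PySem.Str.toList_strip]; exact hs)),
      if_pos (by unfold PySem.Str.split₀; rw [(pv_split₀_nil_iff _).mpr hs]; rfl)]
  · have hne : ¬(fullname.toList = [] ∨ (PySem.Str.strip fullname).toList = []) := by
      rintro (h | h)
      · exact hs (by rw [h]; rfl)
      · exact hs (by rw [← PySem.Str.toList_strip]; exact h)
    have htkne : PySem.Str.split₀ fullname ≠ [] := by
      unfold PySem.Str.split₀
      simp only [ne_eq, List.map_eq_nil_iff]
      exact fun h => hs ((pv_split₀_nil_iff _).mp h)
    rw [if_neg hne, htok, if_neg htkne]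
    by_cases h1 : (PySem.Str.split₀ fullname).length = 1
    · rw [if_pos h1, if_pos h1]
    · rw [if_neg h1, if_neg h1, pv_stripSufB_eq]
      have hmem_ne : ∀ x ∈ pvStripSufA (PySem.Str.split₀ fullname), x.toList ≠ [] := by
        intro x hx
        have hx' : x ∈ PySem.Str.split₀ fullname :=
          (pv_stripSufA_prefix (PySem.Str.split₀ fullname)).subset hx
        unfold PySem.Str.split₀ at hx'
        obtain ⟨t, ht, rfl⟩ := List.mem_map.mp hx'
        rw [String.toList_ofList]
        exact pv_split₀_mem_ne_nil _ t ht
      set ts2 := pvStripSufA (PySem.Str.split₀ fullname) with hts2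
      have hlen1 : 1 ≤ ts2.length := pv_stripSufA_length _ htkne
      by_cases h2 : ts2.length = 1
      · rw [if_pos h2, if_pos h2]
      · rw [if_neg h2, if_neg h2]
        have hlen2 : 2 ≤ ts2.length := by omega
        have hdrop : [PySem.List.pyGetD ts2 (-1) ""] = ts2.drop ((ts2.length - 2) + 1) := by
          rw [pv_pyGetD_neg_one ts2 (by rw [← List.length_pos_iff]; omega)]
          congr 1
          omega
        obtain ⟨j, hj, hres⟩ := pv_particleLoop_inv ts2 (ts2.length - 2) (by omega)
        rw [hdrop, hres]
        have hlp_ne : ts2.drop (j + 1) ≠ [] := by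
          rw [ne_eq, List.drop_eq_nil_iff]
          omega
        simp only [ne_eq, hlp_ne, not_false_eq_true, if_pos]
        by_cases hj1 : 1 ≤ j
        · rw [if_pos hj1]
          -- l.toList ≠ []
          obtain ⟨x, rest, hxr⟩ : ∃ x rest, ts2.drop (j + 1) = x :: rest := by
            cases hd : ts2.drop (j + 1) with
            | nil => exact absurd hd hlp_ne
            | cons x rest => exact ⟨x, rest, rfl⟩
          have hx_ne : x.toList ≠ [] :=
            hmem_ne x (List.mem_of_mem_drop (by rw [hxr]; exact List.mem_cons_self))
          have hl_ne : (PySem.Str.join " " (ts2.drop (j + 1))).toList ≠ [] := by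
            rw [PySem.Str.toList_join, hxr]
            cases rest with
            | nil => simpa [PySem.Chars.join_singleton] using hx_ne
            | cons b r =>
              rw [List.map_cons, List.map_cons, PySem.Chars.join_cons_cons]
              simp [hx_ne]
          rw [if_neg hl_ne]
          have hslice : PySem.List.slice ts2 (some 1) (some ((j : Int) + 1)) = List.take j (List.drop 1 ts2) := by
            rw [show ((j : Int) + 1) = ((j + 1 : Nat) : Int) by push_cast; ring,
              show (1 : Int) = ((1 : Nat) : Int) by norm_num, PySem.List.slice_natCast,
              Nat.add_sub_cancel]
          have hBslice : PySem.List.slice ts2 (some 1) none = List.drop 1 ts2 := by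
            rw [PySem.List.slice_from ts2 (by norm_num : (0:Int) ≤ 1)]
            rfl
          rw [hslice, hBslice]
          refine Prod.ext rfl ?_
          simp only [Option.some.injEq]
          rw [← String.ofList_toList (s := PySem.Str.join " " (ts2.drop 1))]
          apply congrArg String.ofList
          -- character-level equality
          have hsplit : List.drop 1 ts2 = List.take j (List.drop 1 ts2) ++ ts2.drop (j + 1) := by
            conv_lhs => rw [← List.take_append_drop j (List.drop 1 ts2)]
            rw [List.drop_drop]
            congr 2
            omega
          have htake_ne : List.take j (List.drop 1 ts2) ≠ [] := by
            rw [ne_eq, List.take_eq_nil_iff]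
            rintro (h | h)
            · omega
            · rw [List.drop_eq_nil_iff] at h; omega
          rw [PySem.Str.toList_join, PySem.Str.toList_join, PySem.Str.toList_join]
          conv_rhs => rw [hsplit]
          rw [List.map_append,
            pv_join_append _ _ _ (fun hmap => htake_ne (List.map_eq_nil_iff.mp hmap))
              (fun hmap => hlp_ne (List.map_eq_nil_iff.mp hmap))]
          rw [show (" " : String).toList = [' '] from rfl]
          simp [List.append_assoc]
        · rw [if_neg hj1]
          have hj0 : j = 0 := by omega
          rw [PySem.List.slice_from ts2 (by norm_num : (0:Int) ≤ 1)]
          rw [hj0]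
          rfl
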